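-- pv_equiv track=rewrite | github.com/sff1019/wsd1 | coqua/cgi-bin/remake/rel_pref.py | pref_bits
-- ===== SOURCE A (Python) =====
-- def pref_bits(row, pref_words):
-- 	def is_pattern_in_row(itr, s):
-- 		try:
-- 			return True if next(itr) in s else is_pattern_in_row(itr, s)
-- 		except StopIteration:
-- 			return False
-- 	lst = [is_pattern_in_row(iter(pattern),
-- 		str(row['name']) + str(row['history']) + str(row['description']))
-- 		for pattern in pref_words]
-- 	return lst
-- ===== SOURCE B (Python) =====
-- def pref_bits(row, pref_words):
--     s = str(row['name']) + str(row['history']) + str(row['description'])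
--     return [any(w in s for w in pattern) for pattern in pref_words]
-- ===== Notes on version B (the rewrite author's own statement) =====
-- stated objective: idiomatic
-- what changed: Replaced the hand-rolled recursive iterator-consuming helper with a single precomputed concatenation and a built-in any() membership test per pattern.
-- outside the precondition, e.g. on pref_bits({}, []): A returns [], B raises KeyError
import Mathlib
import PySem

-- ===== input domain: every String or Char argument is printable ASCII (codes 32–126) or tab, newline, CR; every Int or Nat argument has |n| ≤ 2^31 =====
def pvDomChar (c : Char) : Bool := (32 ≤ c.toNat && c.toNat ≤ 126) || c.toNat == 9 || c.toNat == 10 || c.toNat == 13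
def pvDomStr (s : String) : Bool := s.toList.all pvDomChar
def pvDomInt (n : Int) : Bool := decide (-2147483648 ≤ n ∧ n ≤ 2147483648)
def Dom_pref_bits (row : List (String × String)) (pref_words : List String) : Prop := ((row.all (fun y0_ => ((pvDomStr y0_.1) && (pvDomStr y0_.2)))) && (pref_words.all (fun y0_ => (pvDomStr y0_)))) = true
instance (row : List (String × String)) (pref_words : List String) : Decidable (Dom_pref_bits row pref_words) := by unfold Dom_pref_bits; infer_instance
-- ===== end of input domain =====

-- B replaces A's recursive iterator helper by a precomputed concatenation and an any() membership test (idiomatic decomposition).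
-- Pre_ excludes rows missing one of the keys 'name'/'history'/'description', on which A raises KeyError.

-- ===== PORT A =====
-- dict[key] lookup on an association list: first match, none = KeyError (A-side)
def pyLookupA? : List (String × String) → String → Option String
  | [], _ => none
  | (k, v) :: rest, key => if k == key then some v else pyLookupA? rest key

-- A's is_pattern_in_row: consume the pattern's characters recursively; 'c in s' for a
-- single character is exactly character membership in s's character list (exact port)
def isPatternInRow : List Char → List Char → Bool
  | [], _ => false
  | c :: rest, s => if s.contains c then true else isPatternInRow rest s

def pref_bits (row : List (String × String)) (pref_words : List String) : List Bool :=
  match pyLookupA? row "name", pyLookupA? row "history", pyLookupA? row "description" with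
  | some n, some h, some d =>
      pref_words.map (fun pattern =>
        isPatternInRow pattern.toList (n.toList ++ h.toList ++ d.toList))
  | _, _, _ => []  -- KeyError in Python; excluded by Pre_pref_bits

-- ===== PORT B =====
def pref_bits_alt (row : List (String × String)) (pref_words : List String) : List Bool :=
  -- B-side lookup: List.lookup is exactly Python's first-match dict access
  match row.lookup "name" with
  | none => []  -- KeyError in Python; excluded by Pre_pref_bits
  | some n =>
    match row.lookup "history" with
    | none => []
    | some h =>
      match row.lookup "description" with
      | none => []
      | some d =>
        let s := n.toList ++ h.toList ++ d.toList
        pref_words.map (fun pattern => pattern.toList.any (fun c => s.contains c))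

-- ===== PRECONDITION & SPEC =====
-- Pre_ excludes rows missing one of the three keys: there both A and B raise KeyError, except that with
-- empty pref_words A's comprehension never evaluates the lookups and accidentally returns [] while B still raises.
def Pre_pref_bits (row : List (String × String)) (pref_words : List String) : Prop :=
  "name" ∈ row.map Prod.fst ∧ "history" ∈ row.map Prod.fst ∧
    "description" ∈ row.map Prod.fst
instance (row : List (String × String)) (pref_words : List String) : Decidable (Pre_pref_bits row pref_words) := by unfold Pre_pref_bits; infer_instance
def pvWitness_pref_bits : (List (String × String)) × List String :=
  ([("name", "Ab"), ("history", "cd"), ("description", "e!")], ["xA", "zz", ""])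
def Spec_pref_bits (row : List (String × String)) (pref_words : List String) (out : List Bool) : Prop := out = pref_bits_alt row pref_words
instance (row : List (String × String)) (pref_words : List String) (out : List Bool) : Decidable (Spec_pref_bits row pref_words out) := by unfold Spec_pref_bits; infer_instance

-- ===== CLAIM (what is proved, stated in full; the proofs are below) =====
def Claim_equal_pref_bits : Prop := ∀ (row : List (String × String)) (pref_words : List String), Dom_pref_bits row pref_words → Pre_pref_bits row pref_words → Spec_pref_bits row pref_words (pref_bits row pref_words)

-- ===== LEMMAS AND PROOFS =====
theorem isPatternInRow_eq_any (l s : List Char) :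
    isPatternInRow l s = l.any (fun c => s.contains c) := by
  induction l with
  | nil => rfl
  | cons c rest ih => cases h : s.contains c <;> simp [isPatternInRow, h, ih]

theorem pyLookupA_eq_lookup (row : List (String × String)) (k : String) :
    pyLookupA? row k = row.lookup k := by
  induction row with
  | nil => rfl
  | cons p rest ih =>
      obtain ⟨a, b⟩ := p
      simp only [pyLookupA?, List.lookup]
      by_cases h : a = k
      · simp [h]
      · have h2 : (k == a) = false := beq_eq_false_iff_ne.mpr (fun e => h e.symm)
        simp [h, h2, ih]

-- ===== VERDICT (by name: the statement is the Claim_ definition above) =====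
theorem pref_bits_spec : Claim_equal_pref_bits := by
  intro row pref_words _ _
  unfold Spec_pref_bits pref_bits pref_bits_alt
  rw [pyLookupA_eq_lookup, pyLookupA_eq_lookup, pyLookupA_eq_lookup]
  cases row.lookup "name" <;> cases row.lookup "history" <;>
    cases row.lookup "description" <;> simp [isPatternInRow_eq_any]
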